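-- pv_equiv track=rewrite | github.com/ntuan19/google_interview | two_pointers.py | findShortestLength
-- ===== SOURCE A (Python) =====
-- def findShortestLength(nums):
--     l = 0
--     r = len(nums)-1
--     arr = []
--     while l < r:
--         min_val = min(nums[l:])
--         max_val = max(nums[:r+1])
--         min_indx = nums.index(min_val)
--         max_indx = nums.index(max_val)
--         if min_indx == l and max_indx == r:
--                     l+=1
--                     r-=1
--         else:
--             return nums[l:r+1]
--     return []
-- ===== SOURCE B (Python) =====
-- def findShortestLength(nums):
--     n = len(nums)
--     if n < 2:
--         return []
--     # suffix minima: sufmin[i] = min(nums[i:])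
--     sufmin = [0] * n
--     sufmin[n - 1] = nums[n - 1]
--     for i in range(n - 2, -1, -1):
--         sufmin[i] = min(nums[i], sufmin[i + 1])
--     # prefix maxima: prefmax[i] = max(nums[:i+1])
--     prefmax = [0] * n
--     prefmax[0] = nums[0]
--     for i in range(1, n):
--         prefmax[i] = max(prefmax[i - 1], nums[i])
--     # first occurrence index of each value
--     first = {}
--     for i, v in enumerate(nums):
--         if v not in first:
--             first[v] = i
--     l, r = 0, n - 1
--     while l < r:
--         if first[sufmin[l]] == l and first[prefmax[r]] == r:
--             l += 1
--             r -= 1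
--         else:
--             return nums[l:r + 1]
--     return []
-- ===== Notes on version B (the rewrite author's own statement) =====
-- stated objective: alternative
-- what changed: Precomputes suffix-min and prefix-max tables and a first-occurrence dict once, and the two-pointer loop reads them instead of rescanning the list with min/max/index at every step.
import Mathlib
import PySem

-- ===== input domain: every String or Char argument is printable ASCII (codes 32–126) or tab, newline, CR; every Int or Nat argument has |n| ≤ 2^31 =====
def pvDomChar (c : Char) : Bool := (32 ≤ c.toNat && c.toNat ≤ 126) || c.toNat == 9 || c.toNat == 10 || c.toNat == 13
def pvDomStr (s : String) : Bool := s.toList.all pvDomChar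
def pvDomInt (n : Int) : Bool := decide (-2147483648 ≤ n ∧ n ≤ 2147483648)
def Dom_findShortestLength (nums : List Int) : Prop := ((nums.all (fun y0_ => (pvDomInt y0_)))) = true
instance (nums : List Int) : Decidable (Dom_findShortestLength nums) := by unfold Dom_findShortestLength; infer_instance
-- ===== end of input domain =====

-- B precomputes suffix-min/prefix-max tables and a first-occurrence dict once; the two-pointer loop reads them instead of rescanning the list with min/max/index each step. A = B on all inputs.


-- ===== PORT A =====
-- A's while-loop: l,r are Python ints but stay ≥ 0 while the loop runs (and the
-- n = 0 case, where Python's r is -1, enters the loop neither there nor here),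
-- so Nat indices with the slices nums[l:] = drop l and nums[:r+1] = take (r+1)
-- are exact.  min/max of a slice nonempty whenever the loop body runs; the
-- `| _, _ => []` arm is unreachable from findShortestLength's initial state.
def pvALoop (nums : List Int) (l r : Nat) : List Int :=
  if _h : l < r then
    match PySem.List.min? (nums.drop l) (fun x => x),
          PySem.List.max? (nums.take (r + 1)) (fun x => x) with
    | some mn, some mx =>
      if PySem.List.index? nums mn = some l ∧ PySem.List.index? nums mx = some r then
        pvALoop nums (l + 1) (r - 1)
      else (nums.drop l).take (r + 1 - l)     -- nums[l:r+1], 0 ≤ l ≤ r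
    | _, _ => []
  else []
  termination_by r - l

def findShortestLength (nums : List Int) : List Int :=
  pvALoop nums 0 (nums.length - 1)

-- ===== PORT B =====
-- sufmin built back-to-front: sufmin[i] = min(nums[i], sufmin[i+1])
def pvSufMin : List Int → List Int
  | [] => []
  | x :: rest =>
    match pvSufMin rest with
    | [] => [x]
    | m :: t => min x m :: m :: t

-- prefmax built front-to-back with running max m: prefmax[i] = max(prefmax[i-1], nums[i])
def pvPmGo (m : Int) : List Int → List Int
  | [] => [m]
  | y :: ys => m :: pvPmGo (max m y) ys

def pvPrefMax : List Int → List Int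
  | [] => []
  | x :: rest => pvPmGo x rest

-- first-occurrence dict: for i, v in enumerate(nums): if v not in first: first[v] = i
def pvBuildFirst : List Int → Nat → PySem.Dict Int Nat → PySem.Dict Int Nat
  | [], _, d => d
  | x :: xs, i, d => pvBuildFirst xs (i + 1) (if d.contains x then d else d.insert x i)

def pvBLoop (nums sufmin prefmax : List Int) (first : PySem.Dict Int Nat) (l r : Nat) : List Int :=
  if _h : l < r then
    if first.get? (sufmin.getD l 0) = some l ∧ first.get? (prefmax.getD r 0) = some r then
      pvBLoop nums sufmin prefmax first (l + 1) (r - 1)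
    else (nums.drop l).take (r + 1 - l)     -- nums[l:r+1]
  else []
  termination_by r - l

def findShortestLength_alt (nums : List Int) : List Int :=
  if nums.length < 2 then []
  else pvBLoop nums (pvSufMin nums) (pvPrefMax nums) (pvBuildFirst nums 0 PySem.Dict.empty)
         0 (nums.length - 1)

-- ===== PRECONDITION & SPEC =====
def Spec_findShortestLength (nums : List Int) (out : List Int) : Prop := out = findShortestLength_alt nums
instance (nums : List Int) (out : List Int) : Decidable (Spec_findShortestLength nums out) := by unfold Spec_findShortestLength; infer_instance

-- ===== CLAIM (what is proved, stated in full; the proofs are below) =====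
def Claim_equal_findShortestLength : Prop := ∀ (nums : List Int), Dom_findShortestLength nums → Spec_findShortestLength nums (findShortestLength nums)

-- ===== LEMMAS AND PROOFS =====

theorem pvSufMin_length (xs : List Int) : (pvSufMin xs).length = xs.length := by
  induction xs with
  | nil => rfl
  | cons x rest ih =>
    simp only [pvSufMin]
    cases h : pvSufMin rest with
    | nil => rw [h] at ih; simp at ih; simp [← ih]
    | cons m t => rw [h] at ih; simp at ih ⊢; omega
    

-- sufmin[l] is min(nums[l:])
theorem pvSufMin_spec (xs : List Int) : ∀ l : Nat, l < xs.length →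
    PySem.List.min? (xs.drop l) (fun x => x) = some ((pvSufMin xs).getD l 0) := by
  induction xs with
  | nil => intro l hl; simp at hl
  | cons x rest ih =>
    intro l hl
    cases l with
    | zero =>
      simp only [List.drop_zero, PySem.List.min?_id_cons, pvSufMin]
      cases hr : pvSufMin rest with
      | nil =>
        have : rest = [] := by
          have := pvSufMin_length rest; rw [hr] at this
          exact List.length_eq_zero_iff.mp this.symm
        subst this; simp
      | cons m t =>
        have hrest : rest ≠ [] := by
          intro h; subst h; simp [pvSufMin] at hr
        obtain ⟨y, ys, rfl⟩ := List.exists_cons_of_ne_nil hrest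
        have h0 := ih 0 (by simp)
        simp only [List.drop_zero, PySem.List.min?_id_cons, hr] at h0
        have hm : m = ys.foldl min y := by simpa using h0.symm
        simp only [List.getD_cons_zero, Option.some.injEq]
        rw [hm, List.foldl_cons, List.foldl_assoc]
    | succ l' =>
      simp only [List.drop_succ_cons]
      simp only [List.length_cons] at hl
      have hl' : l' < rest.length := by omega
      rw [ih l' hl']
      simp only [pvSufMin]
      cases hr : pvSufMin rest with
      | nil =>
        have : rest = [] := by
          have := pvSufMin_length rest; rw [hr] at this
          exact List.length_eq_zero_iff.mp this.symm
        subst this; simp at hl'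
      | cons m t => simp

-- pvPmGo m ys collects the running maxima starting from m
theorem pvPmGo_spec (ys : List Int) : ∀ (m : Int) (r : Nat), r ≤ ys.length →
    (pvPmGo m ys).getD r 0 = (ys.take r).foldl max m := by
  induction ys with
  | nil =>
    intro m r hr
    have hr0 : r = 0 := by simpa using hr
    subst hr0
    simp [pvPmGo]
  | cons y ys ih =>
    intro m r hr
    cases r with
    | zero => simp [pvPmGo]
    | succ r' =>
      simp only [pvPmGo, List.getD_cons_succ, List.take_succ_cons, List.foldl_cons]
      exact ih (max m y) r' (by simpa using Nat.succ_le_succ_iff.mp hr)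

-- prefmax[r] is max(nums[:r+1])
theorem pvPrefMax_spec (xs : List Int) : ∀ r : Nat, r < xs.length →
    PySem.List.max? (xs.take (r + 1)) (fun x => x) = some ((pvPrefMax xs).getD r 0) := by
  intro r hr
  cases xs with
  | nil => simp at hr
  | cons x rest =>
    simp only [List.take_succ_cons, PySem.List.max?_id_cons, pvPrefMax, Option.some.injEq]
    rw [pvPmGo_spec rest x r (by simpa using Nat.lt_succ_iff.mp hr)]

-- building the first-occurrence dict from (xs, i, d) extends d by the shifted first indices
theorem pvBuildFirst_get? (xs : List Int) : ∀ (i : Nat) (d : PySem.Dict Int Nat) (v : Int),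
    (pvBuildFirst xs i d).get? v
      = (d.get? v).or ((PySem.List.index? xs v).map (fun j => i + j)) := by
  induction xs with
  | nil => intro i d v; simp [pvBuildFirst, PySem.List.index?]
  | cons x xs ih =>
    intro i d v
    simp only [pvBuildFirst]
    rw [ih]
    by_cases hv : x = v
    · subst hv
      rw [PySem.List.index?_cons_self]
      by_cases hc : d.contains x
      · obtain ⟨j, hj⟩ : ∃ j, d.get? x = some j := by
          rw [← Option.isSome_iff_exists, ← PySem.Dict.contains_eq_isSome_get?]; exact hc
        simp [hc, hj]
      · have hn : d.get? x = none := by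
          rw [PySem.Dict.get?_eq_none_iff_contains]
          simpa using hc
        rw [if_neg hc, PySem.Dict.get?_insert_self, hn]
        cases PySem.List.index? xs x <;> simp
    · rw [PySem.List.index?_cons_of_ne xs hv]
      have hd : (if d.contains x then d else d.insert x i).get? v = d.get? v := by
        by_cases hc : d.contains x
        · simp [hc]
        · rw [if_neg hc]
          exact PySem.Dict.get?_insert_of_ne _ _ (Ne.symm hv)
      rw [hd]
      congr 1
      cases PySem.List.index? xs v with
      | none => simp
      | some j => simp; omega

theorem pvFirst_get? (nums : List Int) (v : Int) :
    (pvBuildFirst nums 0 PySem.Dict.empty).get? v = PySem.List.index? nums v := by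
  rw [pvBuildFirst_get?]
  simp [PySem.Dict.get?_empty]

-- the two loops agree step by step once the tables are in place
theorem pvLoop_eq (nums : List Int) : ∀ (k l r : Nat), k = r - l → r < nums.length →
    pvALoop nums l r
      = pvBLoop nums (pvSufMin nums) (pvPrefMax nums) (pvBuildFirst nums 0 PySem.Dict.empty) l r := by
  intro k
  induction k using Nat.strong_induction_on with
  | _ k ihk =>
    intro l r hk hr
    rw [pvALoop, pvBLoop]
    by_cases hlr : l < r
    · simp only [hlr, dif_pos]
      have hl : l < nums.length := by omega
      rw [pvSufMin_spec nums l hl, pvPrefMax_spec nums r hr]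
      rw [pvFirst_get? nums ((pvSufMin nums).getD l 0),
          pvFirst_get? nums ((pvPrefMax nums).getD r 0)]
      dsimp only
      by_cases hcond : PySem.List.index? nums ((pvSufMin nums).getD l 0) = some l ∧
          PySem.List.index? nums ((pvPrefMax nums).getD r 0) = some r
      · rw [if_pos hcond, if_pos hcond]
        exact ihk (r - 1 - (l + 1)) (by omega) (l + 1) (r - 1) rfl (by omega)
      · simp only [if_neg hcond]
    · simp [hlr]

-- ===== VERDICT (by name: the statement is the Claim_ definition above) =====
theorem findShortestLength_spec : Claim_equal_findShortestLength := by
  intro nums _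
  unfold Spec_findShortestLength findShortestLength findShortestLength_alt
  by_cases h2 : nums.length < 2
  · rw [pvALoop]
    have h0 : ¬ (0 < nums.length - 1) := by omega
    rw [dif_neg h0, if_pos h2]
  · simp only [h2, if_false]
    exact pvLoop_eq nums (nums.length - 1 - 0) 0 (nums.length - 1) rfl (by omega)
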